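-- pv_equiv track=rewrite | github.com/2D-C0DES/Python | Computer Networks PCA1/Modified Versions/Problem4_Complete.py | ones_complement_addition
-- ===== SOURCE A (Python) =====
-- def ones_complement_addition(a, b, n):
--     result = ""
--     carry = 0
--
--     # Add from LSB to MSB
--     for i in range(n-1, -1, -1):
--         total = carry + int(a[i]) + int(b[i])
--         bit = total % 2
--         carry = total // 2
--         result = str(bit) + result
--
--     # Wrap-around carry
--     if carry == 1:
--         carry_binary = "0"*(n-1) + "1"
--         result = ones_complement_addition(result, carry_binary, n)
--
--     return result
-- ===== SOURCE B (Python) =====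
-- def ones_complement_addition(a, b, n):
--     if n <= 0:
--         return ""
--     s = 0
--     for i in range(n):
--         s += (int(a[i]) + int(b[i])) * 2 ** (n - 1 - i)
--     m = 2 ** n
--     while s // m == 1:
--         s = s % m + 1
--     r = s % m
--     digits = ""
--     while r > 0:
--         digits = str(r % 2) + digits
--         r //= 2
--     return "0" * (n - len(digits)) + digits
-- ===== Notes on version B (the rewrite author's own statement) =====
-- stated objective: alternative
-- what changed: A builds the sum bit by bit with a carry loop over string characters and handles the end-around carry by recursion on freshly built strings; B converts both operands to one integer positional value, folds the end-around carry with an arithmetic while-loop on that whole value, and renders the result back to a zero-padded binary string.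
import Mathlib
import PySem

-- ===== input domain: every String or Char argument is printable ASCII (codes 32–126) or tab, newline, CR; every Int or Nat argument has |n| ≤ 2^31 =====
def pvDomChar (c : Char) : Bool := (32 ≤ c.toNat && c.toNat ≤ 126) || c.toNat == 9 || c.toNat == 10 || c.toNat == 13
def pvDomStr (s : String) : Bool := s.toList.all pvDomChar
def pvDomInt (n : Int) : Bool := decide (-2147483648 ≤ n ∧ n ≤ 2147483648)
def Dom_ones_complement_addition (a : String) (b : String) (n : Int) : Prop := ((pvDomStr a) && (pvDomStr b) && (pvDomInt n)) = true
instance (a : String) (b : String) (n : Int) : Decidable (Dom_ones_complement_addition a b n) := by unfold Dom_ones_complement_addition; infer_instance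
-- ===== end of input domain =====

-- B replaces A's per-bit string loop and wrap-around recursion by one whole-word arithmetic
-- reduction (positional value, end-around-carry while loop, binary render); objective: alternative.

-- ===== PORT A =====

-- int(s[i]) as both Pythons evaluate it (IndexError/ValueError totalised by getD 0; Pre_ keeps those inputs out)
def pvDigit (s : List Char) (i : Int) : Int :=
  ((PySem.List.pyGet? s i).bind (fun c => PySem.Int.ofChars? [c])).getD 0

-- one iteration of A's for-loop body, state (result, carry)
def pvStepA (a b : List Char) (st : List Char × Int) (i : Int) : List Char × Int :=
  let total := st.2 + pvDigit a i + pvDigit b i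
  (PySem.Int.toChars (PySem.Int.mod total 2) ++ st.1, PySem.Int.floordiv total 2)

-- "for i in range(n-1, -1, -1): ..."
def pvLoopA (a b : List Char) (n : Int) : List Char × Int :=
  (PySem.List.pyRange (n-1) (-1) (-1)).foldl (pvStepA a b) ([], 0)

-- A's body; the fuel only makes the recursion structural (the wrap-around recursion has depth ≤ 3, fuel 4 is never exhausted)
def pvRecA : Nat → List Char → List Char → Int → List Char
  | 0, _, _, _ => []
  | f+1, a, b, n =>
    let rc := pvLoopA a b n
    if rc.2 == 1 then pvRecA f rc.1 (List.replicate ((n-1).toNat) '0' ++ ['1']) n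
    else rc.1

def ones_complement_addition (a : String) (b : String) (n : Int) : String :=
  String.ofList (pvRecA 4 a.toList b.toList n)

-- ===== PORT B =====

-- s = sum over i in range(n) of (int(a[i]) + int(b[i])) * 2**(n-1-i)
def pvSumB (a b : List Char) (n : Int) : Int :=
  (PySem.List.pyRange 0 n 1).foldl
    (fun s i => s + (pvDigit a i + pvDigit b i) * 2 ^ ((n-1-i).toNat)) 0

-- "while s // m == 1: s = s % m + 1"  (fuel guard only: this loop runs at most twice)
def pvWrapB : Nat → Int → Int → Int
  | 0, s, _ => s
  | f+1, s, m => if PySem.Int.floordiv s m == 1 then pvWrapB f (PySem.Int.mod s m + 1) m else s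

-- "while r > 0: digits = str(r % 2) + digits; r //= 2"  (fuel n suffices: r < 2^n)
def pvBitsB : Nat → Int → List Char
  | 0, _ => []
  | f+1, r =>
    if 0 < r then pvBitsB f (PySem.Int.floordiv r 2) ++ PySem.Int.toChars (PySem.Int.mod r 2)
    else []

def ones_complement_addition_alt (a : String) (b : String) (n : Int) : String :=
  if n ≤ 0 then String.ofList [] else
    let m : Int := 2 ^ n.toNat
    let s := pvWrapB 3 (pvSumB a.toList b.toList n) m
    let digits := pvBitsB n.toNat (PySem.Int.mod s m)
    String.ofList (List.replicate (n.toNat - digits.length) '0' ++ digits)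

-- ===== PRECONDITION & SPEC =====
-- Pre_: exactly where Python A returns normally — for n > 0 both strings must have at least n
-- characters and their first n characters must be decimal digits (otherwise A raises IndexError/ValueError).
def Pre_ones_complement_addition (a : String) (b : String) (n : Int) : Prop :=
  n ≤ 0 ∨ (n ≤ (a.toList.length : Int) ∧ n ≤ (b.toList.length : Int) ∧
    (a.toList.take n.toNat).all Char.isDigit = true ∧ (b.toList.take n.toNat).all Char.isDigit = true)
instance (a : String) (b : String) (n : Int) : Decidable (Pre_ones_complement_addition a b n) := by
  unfold Pre_ones_complement_addition; infer_instance

def pvWitness_ones_complement_addition : String × String × Int := ("11", "01", 2)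

def Spec_ones_complement_addition (a : String) (b : String) (n : Int) (out : String) : Prop :=
  out = ones_complement_addition_alt a b n
instance (a : String) (b : String) (n : Int) (out : String) : Decidable (Spec_ones_complement_addition a b n out) := by
  unfold Spec_ones_complement_addition; infer_instance

-- ===== CLAIM (what is proved, stated in full; the proofs are below) =====
def Claim_equal_ones_complement_addition : Prop :=
  ∀ (a : String) (b : String) (n : Int), Dom_ones_complement_addition a b n →
    Pre_ones_complement_addition a b n →
    Spec_ones_complement_addition a b n (ones_complement_addition a b n)

-- ===== LEMMAS AND PROOFS =====

-- the low m bits of v, rendered MSB-first and zero-padded to width m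
def pvPad : Nat → Int → List Char
  | 0, _ => []
  | m+1, v => pvPad m (v / 2) ++ PySem.Int.toChars (v % 2)

-- positional value of the first m characters of s (digit at i has weight 2^(m-1-i))
def pvW1 (s : List Char) : Nat → Int
  | 0 => 0
  | m+1 => 2 * pvW1 s m + pvDigit s ↑m

lemma pvSplit (T' e : Int) (_h0 : 0 ≤ T') (he0 : 0 ≤ e) (he2 : e < 2) (m : Nat) :
    (2*T'+e) % 2^(m+1) = 2*(T'%2^m) + e ∧ (2*T'+e) / 2^(m+1) = T'/2^m ∧
    (2*(T'%2^m) + e) / 2 = T'%2^m ∧ (2*(T'%2^m) + e) % 2 = e := by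
  have hK : (0:Int) < 2^m := by positivity
  have hq := Int.emod_add_mul_ediv T' (2^m)
  have hm0 : 0 ≤ T' % 2^m := Int.emod_nonneg _ (by omega)
  have hm1 : T' % 2^m < 2^m := Int.emod_lt_of_pos _ hK
  have h2 : (2:Int)^(m+1) = 2 * 2^m := by ring
  refine ⟨?_, ?_, ?_, ?_⟩
  · rw [h2]
    have key : 2*T'+e = (2*(T'%2^m) + e) + (T'/2^m) * (2*2^m) := by linarith
    rw [key, Int.add_mul_emod_self_right]
    exact Int.emod_eq_of_lt (by omega) (by omega)
  · rw [h2]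
    have key : 2*T'+e = (2*(T'%2^m) + e) + (T'/2^m) * (2*2^m) := by linarith
    rw [key, Int.add_mul_ediv_right _ _ (by omega : (2*2^m:Int) ≠ 0)]
    rw [Int.ediv_eq_zero_of_lt (by omega) (by omega)]; omega
  · omega
  · omega

lemma pvW1_sum_nonneg (a b : List Char) (m : Nat)
    (hab : ∀ k : Nat, k < m → 0 ≤ pvDigit a ↑k + pvDigit b ↑k) :
    0 ≤ pvW1 a m + pvW1 b m := by
  induction m with
  | zero => simp [pvW1]
  | succ m ih =>
    have h1 := ih (fun k hk => hab k (by omega))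
    have h2 := hab m (by omega)
    simp only [pvW1]
    omega

lemma loopA_spec (a b : List Char) : ∀ (m : Nat) (r : List Char) (c : Int), 0 ≤ c →
    (∀ k : Nat, k < m → 0 ≤ pvDigit a ↑k + pvDigit b ↑k) →
    (PySem.List.pyRange ((m:Int)-1) (-1) (-1)).foldl (pvStepA a b) (r, c)
    = (pvPad m ((c + (pvW1 a m + pvW1 b m)) % 2^m) ++ r, (c + (pvW1 a m + pvW1 b m)) / 2^m) := by
  intro m
  induction m with
  | zero =>
    intro r c hc _
    rw [PySem.List.pyRange_neg_one_eq_nil (by omega)]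
    simp [pvW1, pvPad]
  | succ m ih =>
    intro r c hc hab
    have hcons : PySem.List.pyRange ((↑(m+1):Int)-1) (-1) (-1)
        = ((m:Int)) :: PySem.List.pyRange ((m:Int)-1) (-1) (-1) := by
      have := PySem.List.pyRange_neg_one_cons (a := ((m:Int))) (b := -1) (by omega)
      push_cast
      convert this using 3
      omega
    rw [hcons, List.foldl_cons]
    have hd0 : 0 ≤ pvDigit a ↑m + pvDigit b ↑m := hab m (by omega)
    set t := c + pvDigit a ↑m + pvDigit b ↑m with ht
    have ht0 : 0 ≤ t := by omega
    have hstep : pvStepA a b (r, c) ((m:Int))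
        = (PySem.Int.toChars (t % 2) ++ r, t / 2) := by
      simp only [pvStepA]
      rw [PySem.Int.mod_eq_emod_of_pos (by omega), PySem.Int.floordiv_eq_ediv_of_pos (by omega)]
    rw [hstep]
    rw [ih (PySem.Int.toChars (t % 2) ++ r) (t/2) (by positivity) (fun k hk => hab k (by omega))]
    have he0 : 0 ≤ t % 2 := Int.emod_nonneg _ (by omega)
    have he2 : t % 2 < 2 := Int.emod_lt_of_pos _ (by omega)
    set W := pvW1 a m + pvW1 b m with hW
    set T' := t/2 + W with hT'
    have hT : c + (pvW1 a (m+1) + pvW1 b (m+1)) = 2*T' + t % 2 := by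
      simp only [pvW1, hT', hW, ht]
      have := Int.emod_add_mul_ediv t 2
      ring_nf
      omega
    have hW0 : 0 ≤ W := by
      rw [hW]
      exact pvW1_sum_nonneg a b m (fun k hk => hab k (by omega))
    have hT'0 : 0 ≤ T' := by
      have : 0 ≤ t / 2 := by positivity
      omega
    obtain ⟨e1, e2, e3, e4⟩ := pvSplit T' (t % 2) hT'0 he0 he2 m
    rw [hT, e1, e2]
    simp only [pvPad, e3, e4, List.append_assoc]

lemma sumB_sum (a b : List Char) (N : Int) :
    pvSumB a b N = ((PySem.List.pyRange 0 N 1).map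
      (fun i => (pvDigit a i + pvDigit b i) * 2 ^ ((N-1-i).toNat))).sum := by
  unfold pvSumB
  rw [PySem.List.foldl_add]
  simp

lemma sumB_spec (a b : List Char) (m : Nat) : pvSumB a b ↑m = pvW1 a m + pvW1 b m := by
  induction m with
  | zero => simp [pvSumB, pvW1, PySem.List.pyRange_one_eq_nil]
  | succ m ih =>
    rw [sumB_sum] at *
    have hsplit : PySem.List.pyRange 0 (↑(m+1):Int) 1
        = PySem.List.pyRange 0 (↑m:Int) 1 ++ [(↑m:Int)] := by
      push_cast
      exact PySem.List.pyRange_one_succ_right (by omega)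
    rw [hsplit, List.map_append, List.sum_append]
    have hcong : (PySem.List.pyRange 0 (↑m:Int) 1).map
          (fun i => (pvDigit a i + pvDigit b i) * 2 ^ ((↑(m+1):Int)-1-i).toNat)
        = (PySem.List.pyRange 0 (↑m:Int) 1).map
          (fun i => ((pvDigit a i + pvDigit b i) * 2 ^ (((↑m:Int))-1-i).toNat) * 2) := by
      apply List.map_congr_left
      intro i hi
      rw [PySem.List.mem_pyRange_one] at hi
      have hexp : ((↑(m+1):Int)-1-i).toNat = (((↑m:Int))-1-i).toNat + 1 := by omega
      rw [hexp, pow_succ]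
      ring
    rw [hcong, List.sum_map_mul_right]
    simp only [pvW1, List.map_cons, List.map_nil, List.sum_cons, List.sum_nil]
    have hlast : ((↑(m+1):Int)-1-(↑m:Int)).toNat = 0 := by omega
    rw [hlast]
    omega

lemma toChars_mod2 (v : Int) : PySem.Int.toChars (v % 2) = [if v % 2 == 1 then '1' else '0'] := by
  have h0 : 0 ≤ v % 2 := Int.emod_nonneg _ (by omega)
  have h2 : v % 2 < 2 := Int.emod_lt_of_pos _ (by omega)
  interval_cases h : (v % 2) <;> simp <;> decide

lemma pvPad_len (m : Nat) (v : Int) : (pvPad m v).length = m := by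
  induction m generalizing v with
  | zero => rfl
  | succ m ih => simp [pvPad, toChars_mod2, ih]

lemma pvPad_zero (m : Nat) : pvPad m 0 = List.replicate m '0' := by
  induction m with
  | zero => rfl
  | succ m ih =>
    show pvPad m (0/2) ++ PySem.Int.toChars (0 % 2) = _
    rw [List.replicate_succ']
    norm_num [ih]
    decide

lemma pvBits_len (f : Nat) (r : Int) : (pvBitsB f r).length ≤ f := by
  induction f generalizing r with
  | zero => simp [pvBitsB]
  | succ f ih =>
    simp only [pvBitsB]
    split
    · rw [PySem.Int.mod_eq_emod_of_pos (by omega), toChars_mod2]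
      simp
      exact ih _
    · simp

lemma pad_eq (m : Nat) (v : Int) (h0 : 0 ≤ v) (hv : v < 2^m) :
    List.replicate (m - (pvBitsB m v).length) '0' ++ pvBitsB m v = pvPad m v := by
  induction m generalizing v with
  | zero => simp [pvBitsB, pvPad]
  | succ m ih =>
    rcases eq_or_lt_of_le h0 with hz | hpos
    · rw [← hz]
      show List.replicate (m+1 - (pvBitsB (m+1) 0).length) '0' ++ pvBitsB (m+1) 0 = pvPad (m+1) 0
      rw [pvPad_zero]
      simp [pvBitsB]
    · simp only [pvBitsB, if_pos hpos]
      rw [PySem.Int.mod_eq_emod_of_pos (by omega), PySem.Int.floordiv_eq_ediv_of_pos (by omega)]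
      have hdiv0 : 0 ≤ v / 2 := by positivity
      have hdiv : v / 2 < 2^m := by
        have h2 : (2:Int)^(m+1) = 2*2^m := by ring
        omega
      have hlen := pvBits_len m (v/2)
      rw [toChars_mod2]
      have hL : (pvBitsB m (v / 2) ++ [if v % 2 == 1 then '1' else '0']).length
          = (pvBitsB m (v / 2)).length + 1 := by simp
      rw [hL]
      have hcount : m + 1 - ((pvBitsB m (v / 2)).length + 1) = m - (pvBitsB m (v / 2)).length := by omega
      rw [hcount]
      show _ = pvPad m (v/2) ++ PySem.Int.toChars (v % 2)
      rw [← ih (v/2) hdiv0 hdiv, toChars_mod2, List.append_assoc]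

lemma pvDigit_append_length (l : List Char) (c : Char) (t : List Char) :
    pvDigit (l ++ c :: t) ↑l.length = (PySem.Int.ofChars? [c]).getD 0 := by
  unfold pvDigit
  rw [PySem.List.pyGet?_append_length]
  rfl

lemma w1_pad (m : Nat) : ∀ (v : Int) (t : List Char), 0 ≤ v → v < 2^m →
    pvW1 (pvPad m v ++ t) m = v := by
  induction m with
  | zero =>
    intro v t h0 hv
    simp only [pvW1]
    omega
  | succ m ih =>
    intro v t h0 hv
    have hdiv0 : 0 ≤ v / 2 := by positivity
    have hdiv : v / 2 < 2^m := by
      have h2 : (2:Int)^(m+1) = 2*2^m := by ring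
      omega
    simp only [pvW1, pvPad, List.append_assoc]
    rw [ih (v/2) _ hdiv0 hdiv, toChars_mod2]
    have hlen : (pvPad m (v/2)).length = m := pvPad_len m (v/2)
    have hd := pvDigit_append_length (pvPad m (v/2)) (if v % 2 == 1 then '1' else '0') t
    rw [hlen] at hd
    rw [List.singleton_append, hd]
    have h0' : 0 ≤ v % 2 := Int.emod_nonneg _ (by omega)
    have h2' : v % 2 < 2 := Int.emod_lt_of_pos _ (by omega)
    have hv0 : (PySem.Int.ofChars? ['0']).getD 0 = 0 := by decide
    have hv1 : (PySem.Int.ofChars? ['1']).getD 0 = 1 := by decide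
    interval_cases h : (v % 2) <;> simp [hv0, hv1] <;> omega

lemma w1_zeros (m : Nat) (t : List Char) : ∀ j : Nat, j ≤ m →
    pvW1 (List.replicate m '0' ++ t) j = 0 := by
  intro j
  induction j with
  | zero => intro _; rfl
  | succ j ih =>
    intro hj
    simp only [pvW1, ih (by omega)]
    have hd : pvDigit (List.replicate m '0' ++ t) ↑j = 0 := by
      unfold pvDigit
      rw [PySem.List.pyGet?_natCast, List.getElem?_append_left (by simp; omega),
        List.getElem?_replicate_of_lt (by omega)]
      decide
    rw [hd]
    ring

lemma w1_zstr (m : Nat) : pvW1 (List.replicate m '0' ++ ['1']) (m+1) = 1 := by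
  simp only [pvW1, w1_zeros m ['1'] m (le_refl m)]
  have hd := pvDigit_append_length (List.replicate m '0') '1' []
  simp only [List.length_replicate] at hd
  rw [hd]
  decide

lemma pad01 (m : Nat) (v : Int) : ∀ c ∈ pvPad m v, c = '0' ∨ c = '1' := by
  induction m generalizing v with
  | zero => simp [pvPad]
  | succ m ih =>
    intro c hc
    simp only [pvPad, toChars_mod2, List.mem_append, List.mem_singleton] at hc
    rcases hc with h | h
    · exact ih _ c h
    · split at h <;> simp [h]

lemma pvDigit_nonneg_of_01 (l : List Char) (h : ∀ c ∈ l, c = '0' ∨ c = '1') (i : Int) :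
    0 ≤ pvDigit l i := by
  unfold pvDigit
  cases hg : PySem.List.pyGet? l i with
  | none => simp
  | some c =>
    have hm := PySem.List.mem_of_pyGet?_eq_some l hg
    rcases h c hm with rfl | rfl <;> simp <;> decide

lemma char_eq_of_toNat {c d : Char} (h : c.val.toNat = d.val.toNat) : c = d :=
  Char.ext (UInt32.toNat_inj.mp h)

lemma isDigit_cases {c : Char} (h : c.isDigit = true) :
    c = '0' ∨ c = '1' ∨ c = '2' ∨ c = '3' ∨ c = '4' ∨ c = '5' ∨ c = '6' ∨ c = '7' ∨ c = '8' ∨ c = '9' := by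
  simp [Char.isDigit] at h
  obtain ⟨h1, h2⟩ := h
  have hv : 48 ≤ c.val.toNat ∧ c.val.toNat ≤ 57 := ⟨h1, h2⟩
  have hc : c.val.toNat = 48 ∨ c.val.toNat = 49 ∨ c.val.toNat = 50 ∨ c.val.toNat = 51 ∨
      c.val.toNat = 52 ∨ c.val.toNat = 53 ∨ c.val.toNat = 54 ∨ c.val.toNat = 55 ∨
      c.val.toNat = 56 ∨ c.val.toNat = 57 := by omega
  rcases hc with h|h|h|h|h|h|h|h|h|h
  · exact Or.inl (char_eq_of_toNat (c := c) (d := '0') (by rw [h]; rfl))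
  · exact Or.inr (Or.inl (char_eq_of_toNat (c := c) (d := '1') (by rw [h]; rfl)))
  · exact Or.inr (Or.inr (Or.inl (char_eq_of_toNat (c := c) (d := '2') (by rw [h]; rfl))))
  · exact Or.inr (Or.inr (Or.inr (Or.inl (char_eq_of_toNat (c := c) (d := '3') (by rw [h]; rfl)))))
  · exact Or.inr (Or.inr (Or.inr (Or.inr (Or.inl (char_eq_of_toNat (c := c) (d := '4') (by rw [h]; rfl))))))
  · exact Or.inr (Or.inr (Or.inr (Or.inr (Or.inr (Or.inl (char_eq_of_toNat (c := c) (d := '5') (by rw [h]; rfl)))))))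
  · exact Or.inr (Or.inr (Or.inr (Or.inr (Or.inr (Or.inr (Or.inl (char_eq_of_toNat (c := c) (d := '6') (by rw [h]; rfl))))))))
  · exact Or.inr (Or.inr (Or.inr (Or.inr (Or.inr (Or.inr (Or.inr (Or.inl (char_eq_of_toNat (c := c) (d := '7') (by rw [h]; rfl)))))))))
  · exact Or.inr (Or.inr (Or.inr (Or.inr (Or.inr (Or.inr (Or.inr (Or.inr (Or.inl (char_eq_of_toNat (c := c) (d := '8') (by rw [h]; rfl))))))))))
  · exact Or.inr (Or.inr (Or.inr (Or.inr (Or.inr (Or.inr (Or.inr (Or.inr (Or.inr (char_eq_of_toNat (c := c) (d := '9') (by rw [h]; rfl))))))))))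

lemma pvDigit_nonneg_of_digit (l : List Char) (k : Nat) (hk : k < l.length)
    (hd : l[k].isDigit = true) : 0 ≤ pvDigit l ↑k := by
  unfold pvDigit
  rw [PySem.List.pyGet?_natCast, List.getElem?_eq_getElem hk]
  rcases isDigit_cases hd with h|h|h|h|h|h|h|h|h|h <;> rw [h] <;> decide

lemma zl01 (k : Nat) : ∀ c ∈ List.replicate k '0' ++ ['1'], c = '0' ∨ c = '1' := by
  intro c hc
  simp only [List.mem_append, List.mem_replicate, List.mem_singleton] at hc
  rcases hc with ⟨_, h⟩ | h <;> simp [h]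

lemma hdig_of_all (l : List Char) (m : Nat) (hl : m ≤ l.length)
    (hall : (l.take m).all Char.isDigit = true) : ∀ k : Nat, k < m → 0 ≤ pvDigit l ↑k := by
  intro k hk
  have hkl : k < l.length := by omega
  apply pvDigit_nonneg_of_digit l k hkl
  have hmem : l[k] ∈ l.take m := by
    have hk' : k < (l.take m).length := by simp; omega
    have : (l.take m)[k] = l[k] := List.getElem_take
    rw [← this]
    exact List.getElem_mem hk'
  exact List.all_eq_true.mp hall _ hmem

theorem main_equiv : ∀ (a b : String) (n : Int),
    (n ≤ 0 ∨ (n ≤ (a.toList.length : Int) ∧ n ≤ (b.toList.length : Int) ∧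
      (a.toList.take n.toNat).all Char.isDigit = true ∧ (b.toList.take n.toNat).all Char.isDigit = true)) →
    String.ofList (pvRecA 4 a.toList b.toList n)
    = (if n ≤ 0 then String.ofList [] else
        let m : Int := 2 ^ n.toNat
        let s := pvWrapB 3 (pvSumB a.toList b.toList n) m
        let digits := pvBitsB n.toNat (PySem.Int.mod s m)
        String.ofList (List.replicate (n.toNat - digits.length) '0' ++ digits)) := by
  intro a b n hpre
  by_cases hn : n ≤ 0
  · rw [if_pos hn]
    have hL : pvLoopA a.toList b.toList n = ([], 0) := by
      unfold pvLoopA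
      rw [PySem.List.pyRange_neg_one_eq_nil (by omega)]
      rfl
    simp [pvRecA, hL]
  · have hn : 0 < n := by omega
    rw [if_neg (by omega)]
    obtain ⟨k, hmk⟩ : ∃ k : Nat, n = ↑(k+1) := ⟨n.toNat - 1, by omega⟩
    subst hmk
    set m := k + 1 with hmdef
    set as := a.toList
    set bs := b.toList
    have hpre' := hpre.resolve_left (by omega)
    simp only [Int.toNat_natCast] at hpre' ⊢
    obtain ⟨hla, hlb, hda, hdb⟩ := hpre'
    have hab : ∀ j : Nat, j < m → 0 ≤ pvDigit as ↑j + pvDigit bs ↑j := by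
      intro j hj
      have h1 := hdig_of_all as m (by exact_mod_cast hla) hda j hj
      have h2 := hdig_of_all bs m (by exact_mod_cast hlb) hdb j hj
      omega
    set M : Int := 2^m with hMdef
    have hM2 : 2 ≤ M := by
      calc (2:Int) = 2^1 := by norm_num
      _ ≤ 2^m := by
        apply pow_le_pow_right₀ (by norm_num)
        omega
    set S := pvW1 as m + pvW1 bs m with hSdef
    have hS0 : 0 ≤ S := pvW1_sum_nonneg as bs m hab
    have hloop : pvLoopA as bs ↑m = (pvPad m (S % M), S / M) := by
      unfold pvLoopA
      have h := loopA_spec as bs m [] 0 (le_refl 0) hab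
      simpa using h
    have hlow0 : 0 ≤ S % M := Int.emod_nonneg _ (by omega)
    have hlowM : S % M < M := Int.emod_lt_of_pos _ (by omega)
    set low := S % M with hlowdef
    have hsum : pvSumB as bs ↑m = S := sumB_spec as bs m
    -- the zero..zero-one carry string
    have hzl : List.replicate ((↑m - 1:Int)).toNat '0' ++ ['1'] = List.replicate k '0' ++ ['1'] := by
      congr 1
      congr 1
      omega
    -- second-level loop ingredients
    have hab2 : ∀ (l2 : List Char) (h2 : ∀ c ∈ l2, c = '0' ∨ c = '1') (j : Nat), j < m →
        0 ≤ pvDigit l2 ↑j + pvDigit (List.replicate k '0' ++ ['1']) ↑j := by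
      intro l2 h2 j _
      have := pvDigit_nonneg_of_01 l2 h2 ↑j
      have := pvDigit_nonneg_of_01 _ (zl01 k) (↑j : Int)
      omega
    have hW1zl : pvW1 (List.replicate k '0' ++ ['1']) m = 1 := w1_zstr k
    have hloop2 : ∀ (v : Int), 0 ≤ v → v < M →
        pvLoopA (pvPad m v) (List.replicate k '0' ++ ['1']) ↑m
          = (pvPad m ((v + 1) % M), (v + 1) / M) := by
      intro v hv0 hvM
      unfold pvLoopA
      have h := loopA_spec (pvPad m v) (List.replicate k '0' ++ ['1']) m [] 0 (le_refl 0)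
        (hab2 (pvPad m v) (pad01 m v))
      have hw : pvW1 (pvPad m v) m = v := by
        have := w1_pad m v [] hv0 hvM
        rwa [List.append_nil] at this
      rw [hw, hW1zl] at h
      simpa using h
    -- B-side binary rendering
    have hrender : ∀ (v : Int), 0 ≤ v → v < M →
        List.replicate (m - (pvBitsB m v).length) '0' ++ pvBitsB m v = pvPad m v :=
      fun v h0 hv => pad_eq m v h0 hv
    by_cases hq : S / M = 1
    · -- wrap-around carry fires
      have hA1 : pvRecA 4 as bs ↑m
          = pvRecA 3 (pvPad m low) (List.replicate k '0' ++ ['1']) ↑m := by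
        simp only [pvRecA, hloop, hzl]
        rw [if_pos (by simp [hq])]
      rcases lt_or_eq_of_le (show low + 1 ≤ M by omega) with hlt | heq
      · -- single wrap
        have hq2 : (low + 1) / M = 0 := Int.ediv_eq_zero_of_lt (by omega) hlt
        have hmod2 : (low + 1) % M = low + 1 := Int.emod_eq_of_lt (by omega) hlt
        have hA2 : pvRecA 3 (pvPad m low) (List.replicate k '0' ++ ['1']) ↑m
            = pvPad m (low + 1) := by
          simp only [pvRecA, hloop2 low hlow0 hlowM]
          rw [if_neg (by simp [hq2])]
          rw [hmod2]
        have w1 : pvWrapB 3 S M = pvWrapB 2 (low + 1) M := by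
          show (if PySem.Int.floordiv S M == 1 then pvWrapB 2 (PySem.Int.mod S M + 1) M else S) = _
          rw [PySem.Int.floordiv_eq_ediv_of_pos (by omega), PySem.Int.mod_eq_emod_of_pos (by omega),
            hq, ← hlowdef]
          simp
        have w2 : pvWrapB 2 (low + 1) M = low + 1 := by
          show (if PySem.Int.floordiv (low+1) M == 1 then _ else low + 1) = _
          rw [PySem.Int.floordiv_eq_ediv_of_pos (by omega), hq2]
          simp
        rw [hA1, hA2, hsum, w1, w2]
        rw [PySem.Int.mod_eq_emod_of_pos (by omega), hmod2]
        rw [hrender (low+1) (by omega) hlt]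
      · -- double wrap: result was all ones
        have hmodM : (low + 1) % M = 0 := by rw [heq]; exact Int.emod_self
        have hA2 : pvRecA 3 (pvPad m low) (List.replicate k '0' ++ ['1']) ↑m
            = pvRecA 2 (pvPad m 0) (List.replicate k '0' ++ ['1']) ↑m := by
          simp only [pvRecA, hloop2 low hlow0 hlowM, hzl]
          rw [if_pos (by rw [heq]; simp [Int.ediv_self (show M ≠ 0 by omega)])]
          rw [hmodM]
        have h1M : (1:Int) < M := by omega
        have hq3 : (1:Int) / M = 0 := Int.ediv_eq_zero_of_lt (by omega) h1M
        have hmod3 : (1:Int) % M = 1 := Int.emod_eq_of_lt (by omega) h1M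
        have hA3 : pvRecA 2 (pvPad m 0) (List.replicate k '0' ++ ['1']) ↑m = pvPad m 1 := by
          simp only [pvRecA, hloop2 0 (le_refl 0) (by omega)]
          rw [if_neg (by simp [hq3])]
          norm_num [hmod3]
        have w1 : pvWrapB 3 S M = pvWrapB 2 (low + 1) M := by
          show (if PySem.Int.floordiv S M == 1 then pvWrapB 2 (PySem.Int.mod S M + 1) M else S) = _
          rw [PySem.Int.floordiv_eq_ediv_of_pos (by omega), PySem.Int.mod_eq_emod_of_pos (by omega),
            hq, ← hlowdef]
          simp
        have w2 : pvWrapB 2 (low + 1) M = pvWrapB 1 1 M := by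
          show (if PySem.Int.floordiv (low+1) M == 1 then pvWrapB 1 (PySem.Int.mod (low+1) M + 1) M else low + 1) = _
          rw [PySem.Int.floordiv_eq_ediv_of_pos (by omega), PySem.Int.mod_eq_emod_of_pos (by omega),
            hmodM, heq, Int.ediv_self (show M ≠ 0 by omega)]
          simp
        have w3 : pvWrapB 1 1 M = 1 := by
          show (if PySem.Int.floordiv 1 M == 1 then _ else (1:Int)) = _
          rw [PySem.Int.floordiv_eq_ediv_of_pos (by omega), hq3]
          simp
        rw [hA1, hA2, hA3, hsum, w1, w2, w3]
        rw [PySem.Int.mod_eq_emod_of_pos (by omega), hmod3]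
        rw [hrender 1 (by omega) h1M]
    · -- no wrap (carry 0, or a non-binary carry ≥ 2 that A ignores)
      have hA1 : pvRecA 4 as bs ↑m = pvPad m low := by
        simp only [pvRecA, hloop]
        rw [if_neg (by simp [hq])]
      have hB : pvWrapB 3 S M = S := by
        show (if PySem.Int.floordiv S M == 1 then _ else S) = _
        rw [PySem.Int.floordiv_eq_ediv_of_pos (by omega)]
        simp [hq]
      rw [hA1, hsum, hB]
      rw [PySem.Int.mod_eq_emod_of_pos (by omega), ← hlowdef]
      rw [hrender low hlow0 hlowM]

-- ===== VERDICT (by name: the statement is the Claim_ definition above) =====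
theorem ones_complement_addition_spec : Claim_equal_ones_complement_addition := by
  intro a b n _ hpre
  unfold Spec_ones_complement_addition ones_complement_addition ones_complement_addition_alt
  unfold Pre_ones_complement_addition at hpre
  exact main_equiv a b n hpre
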